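-- pv_equiv track=rewrite | github.com/agnihotriparag22/POC_Google_Langextract | app/services/extractor.py | _merge_attributes
-- ===== SOURCE A (Python) =====
-- from collections import defaultdict
--
-- def _merge_attributes(all_attributes: list) -> dict:
--     """
--     Merge multiple attribute dictionaries intelligently
--
--     - For duplicate keys, keep first non-empty value
--     - Collect unique values for repeated keys
--     """
--     if not all_attributes:
--         return {}
--
--     merged = {}
--     value_sets = defaultdict(set)
--
--     for attrs in all_attributes:
--         for key, value in attrs.items():
--             if key not in merged:
--                 merged[key] = value
--
--             # Track all unique values
--             if value:
--                 value_sets[key].add(str(value))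
--
--     # If a key has multiple unique values, create a summary
--     for key, values in value_sets.items():
--         if len(values) > 1:
--             merged[f"{key}_variations"] = ", ".join(sorted(values))
--
--     return merged
-- ===== SOURCE B (Python) =====
-- def _merge_attributes(all_attributes: list) -> dict:
--     """Brute-force per-key scans: no accumulator dicts. Compute the distinct
--     keys in first-appearance order, then answer each key's first value and its
--     sorted distinct truthy values by rescanning the flattened pair list."""
--     if not all_attributes:
--         return {}
--     pairs = [(k, v) for attrs in all_attributes for k, v in attrs.items()]
--     keys = list(dict.fromkeys(k for k, _ in pairs))
--     merged = {k: next(v for kk, v in pairs if kk == k) for k in keys}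
--     for k in dict.fromkeys(k for k, v in pairs if v):
--         uniq = sorted({v for kk, v in pairs if kk == k and v})
--         if len(uniq) > 1:
--             merged[k + "_variations"] = ", ".join(uniq)
--     return merged
-- ===== Notes on version B (the rewrite author's own statement) =====
-- stated objective: alternative
-- what changed: A builds two accumulator dicts (first-value dict plus defaultdict of value sets) in one streaming pass; B keeps no accumulators at all: it flattens to a pair list, fixes the distinct-key order once, and answers each key's first value and sorted distinct truthy values by independent brute-force rescans of that pair list.
import Mathlib
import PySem

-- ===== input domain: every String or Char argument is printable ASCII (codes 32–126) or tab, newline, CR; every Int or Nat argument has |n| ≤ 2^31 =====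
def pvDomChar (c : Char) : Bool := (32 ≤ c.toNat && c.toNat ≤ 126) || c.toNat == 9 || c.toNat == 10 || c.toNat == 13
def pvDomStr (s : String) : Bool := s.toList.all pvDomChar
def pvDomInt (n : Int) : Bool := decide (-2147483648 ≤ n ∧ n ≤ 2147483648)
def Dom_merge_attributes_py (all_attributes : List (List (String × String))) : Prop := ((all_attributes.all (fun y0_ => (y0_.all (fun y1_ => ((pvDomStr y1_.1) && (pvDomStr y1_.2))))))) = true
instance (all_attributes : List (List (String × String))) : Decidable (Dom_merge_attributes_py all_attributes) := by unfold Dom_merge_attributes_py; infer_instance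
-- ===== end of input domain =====

-- B drops A's streaming accumulator dicts and instead answers each distinct key by
-- brute-force rescans of the flattened pair list (objective: alternative algorithm, not faster).

-- ===== PORT A =====
-- Literal port of _merge_attributes: merged and value_sets built in one nested loop, then
-- a variations pass over value_sets.items(). sorted(values) on strings uses the key
-- String.toList because Python's str '<' is code-point order = '<' on the char list.
def merge_attributes_py (all_attributes : List (List (String × String))) : List (String × String) :=
  if all_attributes = [] then []
  else
    let st := all_attributes.foldl
      (fun (st : PySem.Dict String String × PySem.Dict String (PySem.Set String)) attrs =>
        attrs.foldl
          (fun st kv =>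
            (if st.1.contains kv.1 then st.1 else st.1.insert kv.1 kv.2,
             if kv.2 != "" then st.2.insert kv.1 (PySem.Set.add (st.2.getD kv.1 PySem.Set.empty) kv.2) else st.2))
          st)
      (PySem.Dict.empty, PySem.Dict.empty)
    let merged := st.2.items.foldl
      (fun m p =>
        if p.2.length > 1 then
          m.insert (p.1 ++ "_variations") (PySem.Str.join ", " (PySem.List.sorted p.2 String.toList false))
        else m)
      st.1
    merged.items

-- ===== PORT B =====
-- Port of Source B: flatten to pairs, distinct keys in first-appearance order (dict.fromkeys =
-- PySem.List.dedup), then per-key rescans of pairs. next(v for kk,v in pairs if kk == k) is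
-- the head of the key's filtered values; k ∈ keys guarantees it exists, so the Lean default
-- "" of List.getD is never used. The set comprehension is PySem.Set.ofList of the filtered values.
def merge_attributes_py_alt (all_attributes : List (List (String × String))) : List (String × String) :=
  if all_attributes = [] then []
  else
    let pairs := all_attributes.flatMap (fun attrs => attrs)
    let keys := PySem.List.dedup (pairs.map (fun p => p.1))
    let merged : PySem.Dict String String :=
      keys.foldl (fun m k =>
        m.insert k (((pairs.filter (fun p => p.1 == k)).map (fun p => p.2)).getD 0 "")) PySem.Dict.empty
    let merged := (PySem.List.dedup ((pairs.filter (fun p => p.2 != "")).map (fun p => p.1))).foldl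
      (fun m k =>
        let uniq := PySem.List.sorted
          (PySem.Set.ofList ((pairs.filter (fun p => p.1 == k && p.2 != "")).map (fun p => p.2)))
          String.toList false
        if uniq.length > 1 then m.insert (k ++ "_variations") (PySem.Str.join ", " uniq) else m)
      merged
    merged.items

-- ===== PRECONDITION & SPEC =====
def Spec_merge_attributes_py (all_attributes : List (List (String × String))) (out : List (String × String)) : Prop := out = merge_attributes_py_alt all_attributes
instance (all_attributes : List (List (String × String))) (out : List (String × String)) : Decidable (Spec_merge_attributes_py all_attributes out) := by unfold Spec_merge_attributes_py; infer_instance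

-- ===== CLAIM (what is proved, stated in full; the proofs are below) =====
def Claim_equal_merge_attributes_py : Prop := ∀ (all_attributes : List (List (String × String))), Dom_merge_attributes_py all_attributes → Spec_merge_attributes_py all_attributes (merge_attributes_py all_attributes)

-- ===== LEMMAS AND PROOFS =====

theorem pvFoldl_flatMap {α β : Type} (l : List (List α)) (f : β → α → β) (a : β) :
    l.foldl (fun acc xs => xs.foldl f acc) a = (l.flatMap (fun xs => xs)).foldl f a := by
  induction l generalizing a with
  | nil => rfl
  | cons x t ih => simp [List.foldl_append, ih]

theorem pvM_keys (pairs : List (String × String)) (M : PySem.Dict String String) :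
    (pairs.foldl (fun m p => if m.contains p.1 then m else m.insert p.1 p.2) M).keys
      = PySem.Set.update M.keys (pairs.map (fun p => p.1)) := by
  induction pairs generalizing M with
  | nil => rfl
  | cons p t ih =>
    simp only [List.foldl_cons, List.map_cons, PySem.Set.update, List.foldl_cons]
    rw [← PySem.Set.update]
    by_cases hc : M.contains p.1
    · rw [if_pos hc, ih]
      congr 1
      simp [PySem.Set.add, PySem.Set.contains, (PySem.Dict.contains_iff_mem_keys M p.1).mp hc]
    · rw [if_neg hc, ih]
      congr 1
      rw [PySem.Dict.keys_insert_of_not_contains M p.2 (by simpa using hc)]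
      simp only [PySem.Set.add]
      rw [if_neg]
      simp only [PySem.Set.contains]
      intro h
      exact hc ((PySem.Dict.contains_iff_mem_keys M p.1).mpr (by simpa using h))

theorem pvM_getD (pairs : List (String × String)) (M : PySem.Dict String String) (k : String) :
    (pairs.foldl (fun m p => if m.contains p.1 then m else m.insert p.1 p.2) M).getD k ""
      = if M.contains k then M.getD k ""
        else ((pairs.filter (fun p => p.1 == k)).map (fun p => p.2)).getD 0 "" := by
  induction pairs generalizing M with
  | nil =>
    split
    · rfl
    · next hc => exact PySem.Dict.getD_of_not_contains M "" (by simpa using hc)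
  | cons p t ih =>
    simp only [List.foldl_cons]
    by_cases hc : M.contains p.1
    · rw [if_pos hc, ih]
      by_cases hk : p.1 = k
      · subst hk; simp [hc]
      · simp [hk]
    · rw [if_neg hc, ih, PySem.Dict.contains_insert]
      by_cases hk : k = p.1
      · subst hk
        simp [hc]
      · have : (k == p.1) = false := by simpa using hk
        simp only [this, Bool.false_or]
        by_cases hck : M.contains k
        · simp [hck, PySem.Dict.getD_insert, hk]
        · have hpk : (p.1 == k) = false := by simp; exact fun h => hk h.symm
          simp [hck, hpk]

theorem pvV_getD (q : List (String × String)) (d : PySem.Dict String (PySem.Set String)) (k : String) :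
    (q.foldl (fun d p => d.insert p.1 (PySem.Set.add (d.getD p.1 PySem.Set.empty) p.2)) d).getD k PySem.Set.empty
      = ((q.filter (fun p => p.1 == k)).map (fun p => p.2)).foldl PySem.Set.add (d.getD k PySem.Set.empty) := by
  induction q generalizing d with
  | nil => rfl
  | cons p t ih =>
    simp only [List.foldl_cons, List.filter_cons]
    rw [ih]
    by_cases hk : p.1 = k
    · subst hk
      simp
    · have h1 : (p.1 == k) = false := by simpa using hk
      have h2 : k ≠ p.1 := fun h => hk h.symm
      simp [h1, PySem.Dict.getD_insert, h2]

theorem pvMain (l : List (List (String × String))) :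
    merge_attributes_py l = merge_attributes_py_alt l := by
  by_cases hl : l = []
  · subst hl; rfl
  simp only [merge_attributes_py, merge_attributes_py_alt, if_neg hl]
  rw [pvFoldl_flatMap]
  have hsplit :
      (List.foldl
        (fun (st : PySem.Dict String String × PySem.Dict String (PySem.Set String)) kv =>
          (if st.1.contains kv.1 then st.1 else st.1.insert kv.1 kv.2,
           if kv.2 != "" then st.2.insert kv.1 (PySem.Set.add (st.2.getD kv.1 PySem.Set.empty) kv.2) else st.2))
        (PySem.Dict.empty, PySem.Dict.empty) (l.flatMap (fun xs => xs)))
      = ((l.flatMap (fun xs => xs)).foldl (fun m kv => if m.contains kv.1 then m else m.insert kv.1 kv.2) PySem.Dict.empty,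
         (l.flatMap (fun xs => xs)).foldl (fun v kv => if kv.2 != "" then v.insert kv.1 (PySem.Set.add (v.getD kv.1 PySem.Set.empty) kv.2) else v) PySem.Dict.empty) :=
    PySem.List.foldl_prod_mk
      (fun m kv => if m.contains kv.1 then m else m.insert kv.1 kv.2)
      (fun v kv => if kv.2 != "" then v.insert kv.1 (PySem.Set.add (v.getD kv.1 PySem.Set.empty) kv.2) else v)
      (l.flatMap (fun xs => xs)) PySem.Dict.empty PySem.Dict.empty
  rw [hsplit]
  dsimp only
  have hfil :
      (l.flatMap (fun xs => xs)).foldl (fun v kv => if kv.2 != "" then v.insert kv.1 (PySem.Set.add (v.getD kv.1 PySem.Set.empty) kv.2) else v) PySem.Dict.empty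
      = ((l.flatMap (fun xs => xs)).filter (fun kv => kv.2 != "")).foldl (fun v kv => v.insert kv.1 (PySem.Set.add (v.getD kv.1 PySem.Set.empty) kv.2)) PySem.Dict.empty :=
    PySem.List.foldl_if_eq_foldl_filter (fun kv => kv.2 != "")
      (fun v kv => v.insert kv.1 (PySem.Set.add (v.getD kv.1 PySem.Set.empty) kv.2))
      (l.flatMap (fun xs => xs)) PySem.Dict.empty
  rw [hfil]
  set pairs := l.flatMap (fun xs => xs) with hpairs
  set q := pairs.filter (fun kv => kv.2 != "") with hq
  set M := pairs.foldl (fun m kv => if m.contains kv.1 then m else m.insert kv.1 kv.2) (PySem.Dict.empty : PySem.Dict String String) with hM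
  set V := q.foldl (fun v kv => v.insert kv.1 (PySem.Set.add (v.getD kv.1 PySem.Set.empty) kv.2)) (PySem.Dict.empty : PySem.Dict String (PySem.Set String)) with hV
  set keysB := PySem.List.dedup (pairs.map (fun p => p.1)) with hkeysB
  set neKeys := PySem.List.dedup ((pairs.filter (fun p => p.2 != "")).map (fun p => p.1)) with hneKeys
  -- M facts
  have hMkeys : M.keys = PySem.Set.ofList (pairs.map (fun p => p.1)) := by
    rw [hM, pvM_keys]
    simp [PySem.Dict.keys_empty, PySem.Set.update, PySem.Set.ofList_eq_foldl]
  have hMnodup : M.keys.Nodup := by rw [hMkeys]; exact PySem.Set.nodup_ofList _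
  have hMget : forall k, M.getD k "" = ((pairs.filter (fun p => p.1 == k)).map (fun p => p.2)).getD 0 "" := by
    intro k
    rw [hM, pvM_getD]
    simp [PySem.Dict.contains_empty]
  -- B's per-key first-value dict equals A's merged-before-variations
  have hB0 : keysB.foldl (fun m k => m.insert k (((pairs.filter (fun p => p.1 == k)).map (fun p => p.2)).getD 0 "")) PySem.Dict.empty = M := by
    apply PySem.Dict.ext
    rw [PySem.Dict.items_foldl_insert_fresh keysB (fun k => k)
          (fun k => ((pairs.filter (fun p => p.1 == k)).map (fun p => p.2)).getD 0 "") PySem.Dict.empty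
          (by intro a _; exact PySem.Dict.contains_empty _)
          (by simp [hkeysB])]
    rw [PySem.Dict.items_eq_map_keys M hMnodup ""]
    rw [show (PySem.Dict.empty : PySem.Dict String String).items = [] from rfl, List.nil_append]
    rw [hMkeys, hkeysB, PySem.List.dedup_eq_ofList]
    apply List.map_congr_left
    intro k _
    rw [hMget k]
  rw [hB0]
  -- V facts
  have hVkeys : V.keys = neKeys := by
    rw [hV, PySem.Dict.keys_foldl_insert_key q (fun p => p.1) (fun d p => PySem.Set.add (d.getD p.1 PySem.Set.empty) p.2) PySem.Dict.empty]
    rw [hneKeys, PySem.List.dedup_eq_ofList, hq]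
    simp [PySem.Dict.keys_empty, PySem.Set.update, PySem.Set.ofList_eq_foldl]
  have hVnodup : V.keys.Nodup := by
    rw [hVkeys, hneKeys, PySem.List.dedup_eq_ofList]
    exact PySem.Set.nodup_ofList _
  have hVget : forall k, V.getD k PySem.Set.empty = PySem.Set.ofList ((q.filter (fun p => p.1 == k)).map (fun p => p.2)) := by
    intro k
    rw [hV, pvV_getD]
    simp [PySem.Dict.getD_empty, PySem.Set.ofList_eq_foldl, PySem.Set.empty]
  have hVitems : V.items = neKeys.map (fun k => (k, V.getD k PySem.Set.empty)) := by
    rw [PySem.Dict.items_eq_map_keys V hVnodup PySem.Set.empty, hVkeys]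
  rw [hVitems, List.foldl_map]
  -- the two variation passes agree pointwise
  have huniq : forall k, PySem.Set.ofList ((pairs.filter (fun p => p.1 == k && p.2 != "")).map (fun p => p.2)) = PySem.Set.ofList ((q.filter (fun p => p.1 == k)).map (fun p => p.2)) := by
    intro k
    congr 1
    rw [hq, List.filter_filter]
  apply congrArg PySem.Dict.items
  apply PySem.List.foldl_congr_mem
  intro m k _
  rw [hVget k, ← huniq k, PySem.List.length_sorted]

-- ===== VERDICT (by name: the statement is the Claim_ definition above) =====
theorem merge_attributes_py_spec : Claim_equal_merge_attributes_py := by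
  intro all_attributes _
  unfold Spec_merge_attributes_py
  exact pvMain all_attributes
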